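-- pv_equiv track=rewrite | github.com/fabiopauli/polymarket-board | dashboard.py | calc_layout
-- ===== SOURCE A (Python) =====
-- TOP_N_CONTENDERS = 5
--
-- def calc_layout(width: int) -> tuple[int, int, int]:
--     """Return (num_contenders, name_col_width, event_col_width) for a given terminal width."""
--     # Column widths (content + rich 1-char padding each side = +2 per col):
--     #   #(3) + Event(35) + Total(9) + 24h(8) = 55 content
--     #   separators between cols: (4 fixed cols + n*3 contender cols - 1) spaces
--     #   Per contender: name_w + price(5) + delta(7) content
--     PRICE_W   = 5   # e.g. "27¢", "100¢", "<1¢"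
--     DELTA_W   = 7   # e.g. "▼-0.4", "▲+1.5", "—"
--     FIXED_COLS_W = 3 + 35 + 9 + 8  # # + Event + Total + 24h
--     MIN_NAME_W   = 8
--     EVENT_W      = 35
--
--     # Separator count: between fixed cols (3) + per contender (2 separators: name|price|delta)
--     # Total separators = 3 + n*2 + n (one between each contender group and next) roughly
--     # Simpler: each "column" in rich is separated by 1 space, total seps = total_cols - 1
--     # total_cols = 4 + n*3; seps = 3 + n*3
--     # total = FIXED_COLS_W + n*(MIN_NAME_W + PRICE_W + DELTA_W) + (3 + n*3) + 2 (pad_edge)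
--
--     def total_width(n, name_w):
--         seps = 3 + n * 3
--         return FIXED_COLS_W + n * (name_w + PRICE_W + DELTA_W) + seps + 2
--
--     n = 0
--     for k in range(TOP_N_CONTENDERS, 0, -1):
--         if total_width(k, MIN_NAME_W) <= width:
--             n = k
--             break
--     if n == 0:
--         n = 1
--
--     # Distribute leftover space into name columns
--     leftover = width - total_width(n, MIN_NAME_W)
--     name_w = MIN_NAME_W + leftover // n
--
--     return n, name_w, EVENT_W
-- ===== SOURCE B (Python) =====
-- TOP_N_CONTENDERS = 5
--
-- def calc_layout(width: int) -> tuple[int, int, int]: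
--     """Return (num_contenders, name_col_width, event_col_width) for a given terminal width."""
--     MIN_NAME_W = 8
--     EVENT_W = 35
--     # total_width(n, MIN_NAME_W) = 60 + 23*n, linear and monotone in n,
--     # so the largest fitting n is computed in closed form.
--     n = max(1, min(TOP_N_CONTENDERS, (width - 60) // 23))
--     leftover = width - (60 + 23 * n)
--     name_w = MIN_NAME_W + leftover // n
--     return n, name_w, EVENT_W
-- ===== Notes on version B (the rewrite author's own statement) =====
-- stated objective: simpler
-- what changed: The descending search loop for the largest fitting contender count is replaced by a closed-form clamp, exploiting that the total width at minimum name width is linear and monotone in the contender count; leftover and name width are then computed directly.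
import Mathlib
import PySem

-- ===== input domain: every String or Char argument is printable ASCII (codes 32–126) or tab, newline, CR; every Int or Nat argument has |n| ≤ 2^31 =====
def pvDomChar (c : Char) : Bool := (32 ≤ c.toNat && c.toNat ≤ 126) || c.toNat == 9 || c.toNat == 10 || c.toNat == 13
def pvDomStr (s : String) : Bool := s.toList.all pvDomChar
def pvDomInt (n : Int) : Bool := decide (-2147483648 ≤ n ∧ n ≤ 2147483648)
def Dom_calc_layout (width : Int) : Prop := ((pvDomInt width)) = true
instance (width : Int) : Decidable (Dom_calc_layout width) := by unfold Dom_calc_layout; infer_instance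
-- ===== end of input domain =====

-- B replaces A's descending search loop for n with the closed form max(1, min(5, (width-60)//23)); objective: simpler.

-- ===== PORT A =====
-- inner helper total_width (with the literal constants folded as in the source)
def pvTotalWidth (n name_w : Int) : Int :=
  (3 + 35 + 9 + 8) + n * (name_w + 5 + 7) + (3 + n * 3) + 2

-- the 'for k in range(TOP_N_CONTENDERS, 0, -1): if … : n = k; break' loop, n initially 0
def pvLoopA (width : Int) : List Int → Int
  | [] => 0
  | k :: rest => if pvTotalWidth k 8 ≤ width then k else pvLoopA width rest

def calc_layout (width : Int) : Int × Int × Int :=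
  let n0 := pvLoopA width (PySem.List.pyRange 5 0 (-1))
  let n := if n0 = 0 then 1 else n0
  let leftover := width - pvTotalWidth n 8
  let name_w := 8 + PySem.Int.floordiv leftover n
  (n, name_w, 35)

-- ===== PORT B =====
def calc_layout_alt (width : Int) : Int × Int × Int :=
  let n := max 1 (min 5 (PySem.Int.floordiv (width - 60) 23))
  let leftover := width - (60 + 23 * n)
  let name_w := 8 + PySem.Int.floordiv leftover n
  (n, name_w, 35)

-- ===== PRECONDITION & SPEC =====
def Spec_calc_layout (width : Int) (out : Int × Int × Int) : Prop := out = calc_layout_alt width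
instance (width : Int) (out : Int × Int × Int) : Decidable (Spec_calc_layout width out) := by unfold Spec_calc_layout; infer_instance

-- ===== CLAIM (what is proved, stated in full; the proofs are below) =====
def Claim_equal_calc_layout : Prop := ∀ (width : Int), Dom_calc_layout width → Spec_calc_layout width (calc_layout width)

-- ===== LEMMAS AND PROOFS =====

theorem pyRange_5_0_neg1 : PySem.List.pyRange 5 0 (-1) = [5, 4, 3, 2, 1] := by decide

-- ===== VERDICT (by name: the statement is the Claim_ definition above) =====
theorem calc_layout_spec : Claim_equal_calc_layout := by
  intro width _
  show calc_layout width = calc_layout_alt width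
  unfold calc_layout calc_layout_alt pvLoopA pvTotalWidth
  rw [pyRange_5_0_neg1]
  simp only [pvLoopA]
  rw [PySem.Int.floordiv_eq_ediv_of_pos (a := width - 60) (by norm_num)]
  split_ifs <;> simp only [pvTotalWidth] at * <;>
  first
    | (exfalso; omega)
    | (exact absurd trivial (by assumption))
    | (rw [show max 1 (min 5 ((width - 60) / 23)) = 5 from by omega]; norm_num)
    | (rw [show max 1 (min 5 ((width - 60) / 23)) = 4 from by omega]; norm_num)
    | (rw [show max 1 (min 5 ((width - 60) / 23)) = 3 from by omega]; norm_num)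
    | (rw [show max 1 (min 5 ((width - 60) / 23)) = 2 from by omega]; norm_num)
    | (rw [show max 1 (min 5 ((width - 60) / 23)) = 1 from by omega]; norm_num)
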